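-- pv_equiv track=rewrite | github.com/miliar/Code_Jam_Webscraper | solutions_python/solutions_year14_round4_nr2/51.py | solve
-- ===== SOURCE A (Python) =====
-- def solve(A):
-- 	swaps = 0
-- 	values = sorted(A)
-- 	for v in values:
-- 		pos = A.index(v)
-- 		A1 = A[:pos]
-- 		A2 = A[(pos+1):]
-- 		swaps += min(len(A1), len(A2))
-- 		A = A1 + A2
-- 	return swaps
-- ===== SOURCE B (Python) =====
-- def solve(A):
--     n = len(A)
--     total = 0
--     for i in range(n):
--         v = A[i]
--         left = 0
--         for j in range(i):
--             if A[j] > v: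
--                 left += 1
--         right = 0
--         for j in range(i + 1, n):
--             if A[j] >= v:
--                 right += 1
--         total += min(left, right)
--     return total
-- ===== Notes on version B (the rewrite author's own statement) =====
-- stated objective: alternative
-- what changed: Instead of simulating the removal process (sort the values, repeatedly find, slice and rebuild the list), B computes each element's contribution directly: min(# strictly larger elements to its left, # greater-or-equal elements to its right), summed in one pass of pairwise counts with no sorting and no list rebuilding.
import Mathlib
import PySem

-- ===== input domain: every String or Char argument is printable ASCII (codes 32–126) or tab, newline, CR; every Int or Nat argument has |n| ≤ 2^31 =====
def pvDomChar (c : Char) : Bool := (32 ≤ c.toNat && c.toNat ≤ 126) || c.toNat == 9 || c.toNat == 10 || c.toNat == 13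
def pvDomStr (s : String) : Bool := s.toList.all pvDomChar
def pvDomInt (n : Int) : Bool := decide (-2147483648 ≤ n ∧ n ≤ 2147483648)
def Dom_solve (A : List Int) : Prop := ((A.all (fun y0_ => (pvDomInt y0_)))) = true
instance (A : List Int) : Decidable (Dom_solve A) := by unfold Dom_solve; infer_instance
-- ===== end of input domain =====

-- B replaces A's removal simulation by a direct per-element pairwise count; alternative algorithm, same asymptotic cost.

-- ===== PORT A =====
-- loop 'for v in values', state = (current list A, swaps); A.index(v) never fails
-- (sorted(A) is a permutation of A and one occurrence of v is removed per step),
-- so the 'none' branch below is unreachable.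
def solveLoopA : List Int → List Int → Int → Int
  | [], _, swaps => swaps
  | v :: vs, A, swaps =>
    match PySem.List.index? A v with
    | none => swaps
    | some pos =>
      let A1 := PySem.List.slice A none (some (pos : Int))
      let A2 := PySem.List.slice A (some ((pos : Int) + 1)) none
      solveLoopA vs (A1 ++ A2) (swaps + min (A1.length : Int) (A2.length : Int))

def solve (A : List Int) : Int :=
  solveLoopA (PySem.List.sorted A (fun x => x) false) A 0

-- ===== PORT B =====
def solve_alt (A : List Int) : Int :=
  let n : Int := A.length
  (PySem.List.pyRange 0 n 1).foldl (fun total i =>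
    let v := PySem.List.pyGetD A i 0
    let left := (PySem.List.pyRange 0 i 1).foldl
      (fun c j => if PySem.List.pyGetD A j 0 > v then c + 1 else c) (0 : Int)
    let right := (PySem.List.pyRange (i + 1) n 1).foldl
      (fun c j => if PySem.List.pyGetD A j 0 ≥ v then c + 1 else c) (0 : Int)
    total + min left right) 0

-- ===== PRECONDITION & SPEC =====
def Spec_solve (A : List Int) (out : Int) : Prop := out = solve_alt A
instance (A : List Int) (out : Int) : Decidable (Spec_solve A out) := by unfold Spec_solve; infer_instance

-- ===== CLAIM (what is proved, stated in full; the proofs are below) =====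
def Claim_equal_solve : Prop := ∀ (A : List Int), Dom_solve A → Spec_solve A (solve A)

-- ===== LEMMAS AND PROOFS =====

-- the common mathematical value: sum over elements of
-- min(#strictly-larger already seen, #greater-or-equal still to come)
def hSum : List Int → List Int → Int
  | _, [] => 0
  | acc, x :: r =>
      min ((acc.countP (fun y => decide (x < y))) : Int)
          ((r.countP (fun y => decide (x ≤ y))) : Int)
      + hSum (acc ++ [x]) r

-- B's inner counting loop is a countP over a slice of A
theorem innerCount (A : List Int) (p : Int → Prop) [DecidablePred p] :
    ∀ (k a : Nat) (c0 : Int), a + k ≤ A.length →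
    (PySem.List.pyRange (a : Int) ((a : Int) + (k : Int)) 1).foldl
        (fun c j => if p (PySem.List.pyGetD A j 0) then c + 1 else c) c0
      = c0 + (((A.drop a).take k).countP (fun y => decide (p y)) : Int) := by
  intro k
  induction k with
  | zero => intro a c0 _; rw [PySem.List.pyRange_one_eq_nil (by omega)]; simp
  | succ k ih =>
    intro a c0 h
    have ha : a < A.length := by omega
    rw [PySem.List.pyRange_one_cons (by push_cast; omega)]
    have hend : ((a : Int) + ((k + 1 : Nat) : Int)) = (((a + 1 : Nat)) : Int) + (k : Int) := by
      push_cast; ring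
    rw [List.foldl_cons]
    have hrange : PySem.List.pyRange ((a : Int) + 1) ((a : Int) + ((k + 1 : Nat) : Int)) 1
        = PySem.List.pyRange (((a + 1 : Nat)) : Int) ((((a + 1 : Nat)) : Int) + (k : Int)) 1 := by
      rw [hend]; push_cast; ring_nf
    rw [hrange, ih (a + 1) _ (by omega)]
    have hget : PySem.List.pyGetD A (a : Int) 0 = A[a] := by
      simp [PySem.List.pyGetD_natCast, List.getD_eq_getElem?_getD, List.getElem?_eq_getElem ha]
    have hdrop : A.drop a = A[a] :: A.drop (a + 1) := List.drop_eq_getElem_cons ha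
    rw [hget, hdrop, List.take_succ_cons, List.countP_cons]
    by_cases hp : p A[a]
    · simp only [if_pos hp, decide_eq_true hp]
      push_cast; ring
    · simp [hp]

-- B's loop body, named for the proofs (identical to the lambda in solve_alt)
def bodyB (A : List Int) (total i : Int) : Int :=
  let v := PySem.List.pyGetD A i 0
  let left := (PySem.List.pyRange 0 i 1).foldl
    (fun c j => if PySem.List.pyGetD A j 0 > v then c + 1 else c) (0 : Int)
  let right := (PySem.List.pyRange (i + 1) ((A.length : Nat) : Int) 1).foldl
    (fun c j => if PySem.List.pyGetD A j 0 ≥ v then c + 1 else c) (0 : Int)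
  total + min left right

theorem solve_alt_eq_bodyB (A : List Int) :
    solve_alt A = (PySem.List.pyRange 0 ((A.length : Nat) : Int) 1).foldl (bodyB A) 0 := rfl

-- B's outer loop accumulates hSum over the split of A at k
theorem outerLoop (A : List Int) :
    ∀ (m k : Nat) (t0 : Int), A.length - k ≤ m → k ≤ A.length →
    (PySem.List.pyRange (k : Int) ((A.length : Nat) : Int) 1).foldl (bodyB A) t0
      = t0 + hSum (A.take k) (A.drop k) := by
  intro m
  induction m with
  | zero =>
    intro k t0 hm hk
    have hk' : k = A.length := by omega
    subst hk'
    rw [PySem.List.pyRange_one_eq_nil (by omega)]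
    simp [hSum]
  | succ m ih =>
    intro k t0 hm hk
    by_cases hkl : k = A.length
    · subst hkl
      rw [PySem.List.pyRange_one_eq_nil (by omega)]
      simp [hSum]
    · have hklt : k < A.length := by omega
      rw [PySem.List.pyRange_one_cons (by omega)]
      rw [List.foldl_cons]
      have hget : PySem.List.pyGetD A (k : Int) 0 = A[k] := by
        simp [PySem.List.pyGetD_natCast, List.getD_eq_getElem?_getD, List.getElem?_eq_getElem hklt]
      have hleft := innerCount A (fun y => A[k] < y) k 0 (0 : Int) (by omega)
      have hright := innerCount A (fun y => A[k] ≤ y) (A.length - (k + 1)) (k + 1) (0 : Int) (by omega)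
      have e2 : (0 : Int) + (k : Int) = (k : Int) := by ring
      have e3 : (((k + 1 : Nat)) : Int) + ((A.length - (k + 1) : Nat) : Int) = ((A.length : Nat) : Int) := by
        push_cast [Nat.cast_sub (by omega : k + 1 ≤ A.length)]; ring
      have e4 : (((k + 1 : Nat)) : Int) = (k : Int) + 1 := by push_cast [Nat.cast_add]; ring
      simp only [Nat.cast_zero, zero_add, List.drop_zero] at hleft
      rw [e3] at hright
      rw [e4] at hright
      beta_reduce at hleft hright
      have hstep : bodyB A t0 (k : Int)
          = t0 + min ((List.countP (fun y => decide (A[k] < y)) (A.take k)) : Int)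
                     ((List.countP (fun y => decide (A[k] ≤ y)) ((A.drop (k + 1)).take (A.length - (k + 1)))) : Int) := by
        simp only [bodyB, hget, gt_iff_lt, ge_iff_le, hleft, hright, zero_add]
      rw [hstep]
      have hih := ih (k + 1) (t0 + min ((List.countP (fun y => decide (A[k] < y)) (A.take k)) : Int)
                     ((List.countP (fun y => decide (A[k] ≤ y)) ((A.drop (k + 1)).take (A.length - (k + 1)))) : Int)) (by omega) (by omega)
      rw [e4] at hih
      rw [hih]
      have hdrop : A.drop k = A[k] :: A.drop (k + 1) := List.drop_eq_getElem_cons hklt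
      have htake : A.take (k + 1) = A.take k ++ [A[k]] := by
        rw [List.take_add_one, List.getElem?_eq_getElem hklt]; rfl
      have htk : (A.drop (k + 1)).take (A.length - (k + 1)) = A.drop (k + 1) := by
        apply List.take_of_length_le; simp
      rw [htake, htk]
      conv_rhs => rw [hdrop]
      rw [hSum]
      ring

-- solve_alt computes hSum [] A
theorem solve_alt_eq_hSum (A : List Int) : solve_alt A = hSum [] A := by
  have h := outerLoop A A.length 0 0 (by omega) (by omega)
  rw [solve_alt_eq_bodyB]
  simpa using h

-- the accumulator only matters through its strictly-larger counts
theorem hSum_acc_congr :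
    ∀ (L acc1 acc2 : List Int),
    (∀ x ∈ L, acc1.countP (fun y => decide (x < y)) = acc2.countP (fun y => decide (x < y))) →
    hSum acc1 L = hSum acc2 L := by
  intro L
  induction L with
  | nil => intro _ _ _; rfl
  | cons x r ih =>
    intro acc1 acc2 hcnt
    simp only [hSum]
    rw [hcnt x (by simp), ih (acc1 ++ [x]) (acc2 ++ [x]) ?_]
    intro y hy
    rw [List.countP_append, List.countP_append, hcnt y (by simp [hy])]

-- removing a minimal element v at its first position from the rest
theorem hSum_erase :
    ∀ (L1 : List Int) (v : Int) (L2 acc : List Int),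
    (∀ x ∈ L1, v < x) → (∀ x ∈ L2, v ≤ x) →
    hSum acc (L1 ++ v :: L2)
      = min (((acc ++ L1).countP (fun y => decide (v < y))) : Int) (L2.length : Int)
        + hSum acc (L1 ++ L2) := by
  intro L1
  induction L1 with
  | nil =>
    intro v L2 acc _ h2
    simp only [List.nil_append, hSum]
    have hlen : L2.countP (fun y => decide (v ≤ y)) = L2.length :=
      List.countP_eq_length.mpr (by intro y hy; simpa using h2 y hy)
    rw [hlen, hSum_acc_congr L2 (acc ++ [v]) acc ?_]
    · simp
    · intro x hx
      rw [List.countP_append]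
      have : ¬ (x < v) := by have := h2 x hx; omega
      simp [this]
  | cons a L1' ih =>
    intro v L2 acc h1 h2
    have hav : v < a := h1 a (by simp)
    simp only [List.cons_append, hSum]
    have hcnt : (L1' ++ v :: L2).countP (fun y => decide (a ≤ y))
        = (L1' ++ L2).countP (fun y => decide (a ≤ y)) := by
      rw [List.countP_append, List.countP_cons, List.countP_append]
      have : ¬ (a ≤ v) := by omega
      simp [this]
    rw [hcnt, ih v L2 (acc ++ [a]) (fun x hx => h1 x (by simp [hx])) h2]
    have hassoc : acc ++ [a] ++ L1' = acc ++ a :: L1' := by simp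
    rw [hassoc]
    ring

-- A's loop computes hSum [] L
theorem loopA_eq :
    ∀ (n : Nat) (L : List Int) (s : Int), L.length ≤ n →
    solveLoopA (PySem.List.sorted L (fun x => x) false) L s = s + hSum [] L := by
  intro n
  induction n with
  | zero =>
    intro L s h
    have : L = [] := List.length_eq_zero_iff.mp (by omega)
    subst this
    simp [solveLoopA, hSum, PySem.List.sorted]
  | succ n ih =>
    intro L s h
    rcases hL : PySem.List.sorted L (fun x => x) false with _ | ⟨v, vs⟩
    · have : L = [] := (PySem.List.sorted_eq_nil_iff L _ _).mp hL
      subst this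
      simp [solveLoopA, hSum]
    · have hvL : v ∈ L := by
        rw [← PySem.List.mem_sorted (key := fun x => x) (rev := false)]
        rw [hL]; simp
      have hidx : (PySem.List.index? L v).isSome := (PySem.List.index?_isSome_iff L v).mpr hvL
      obtain ⟨pos, hpos⟩ := Option.isSome_iff_exists.mp hidx
      obtain ⟨pre, suf, hLsplit, hprelen, hvpre⟩ := (PySem.List.index?_eq_some_iff L v pos).mp hpos
      have hmin : ∀ y ∈ L, v ≤ y := by
        intro y hy
        exact PySem.List.key_head_sorted_le L (fun x => x) hL y hy
      have hpre : ∀ x ∈ pre, v < x := by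
        intro x hx
        have hle : v ≤ x := hmin x (by rw [hLsplit]; simp [hx])
        have hne : x ≠ v := fun he => hvpre (he ▸ hx)
        omega
      have hsuf : ∀ x ∈ suf, v ≤ x := by
        intro x hx
        exact hmin x (by rw [hLsplit]; simp [hx])
      -- evaluate one iteration of the loop
      have hA1 : PySem.List.slice L none (some (pos : Int)) = pre := by
        rw [PySem.List.slice_to_natCast, hLsplit, ← hprelen, List.take_left]
      have hA2 : PySem.List.slice L (some ((pos : Int) + 1)) none = suf := by
        have : ((pos : Int) + 1) = (((pos + 1 : Nat)) : Int) := by push_cast; ring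
        rw [this, PySem.List.slice_from_natCast, hLsplit]
        have : pre ++ v :: suf = (pre ++ [v]) ++ suf := by simp
        rw [this]
        have hlen : (pre ++ [v]).length = pos + 1 := by simp [hprelen]
        rw [← hlen, List.drop_left]
      have step : solveLoopA (v :: vs) L s
          = solveLoopA vs (pre ++ suf) (s + min (pre.length : Int) (suf.length : Int)) := by
        simp only [solveLoopA, hpos, hA1, hA2]
      -- vs is sorted(pre ++ suf)
      have hperm : vs.Perm (pre ++ suf) := by
        have h1 : (v :: vs).Perm L := by rw [← hL]; exact PySem.List.sorted_perm L _ _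
        have h2 : (pre ++ v :: suf).Perm (v :: (pre ++ suf)) := List.perm_middle
        have h3 : (v :: vs).Perm (v :: (pre ++ suf)) := by
          rw [hLsplit] at h1; exact h1.trans h2
        exact h3.cons_inv
      have hpw : vs.Pairwise (· ≤ ·) := by
        have := PySem.List.sorted_pairwise L (fun x => x)
        rw [hL] at this
        exact (List.pairwise_cons.mp this).2
      have hvs : PySem.List.sorted (pre ++ suf) (fun x => x) false = vs :=
        PySem.List.sorted_id_eq_of_perm_of_pairwise (pre ++ suf) vs hperm hpw
      have hlenps : (pre ++ suf).length ≤ n := by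
        have : L.length = pre.length + suf.length + 1 := by rw [hLsplit]; simp; omega
        simp; omega
      have hIH := ih (pre ++ suf) (s + min (pre.length : Int) (suf.length : Int)) hlenps
      rw [hvs] at hIH
      -- hSum side
      have hcP : pre.countP (fun y => decide (v < y)) = pre.length :=
        List.countP_eq_length.mpr (by intro y hy; simpa using hpre y hy)
      have hE := hSum_erase pre v suf [] hpre hsuf
      rw [List.nil_append, hcP] at hE
      rw [← hL, hL, step, hIH, hLsplit, hE]
      ring

-- ===== VERDICT (by name: the statement is the Claim_ definition above) =====
theorem solve_spec : Claim_equal_solve := by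
  intro A _
  unfold Spec_solve
  rw [solve_alt_eq_hSum]
  have := loopA_eq A.length A 0 (le_refl _)
  simpa [solve] using this
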